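-- pv_equiv track=rewrite | github.com/tyydev1/metrima | metrima/lib.py | span
-- ===== SOURCE A (Python) =====
-- from typing import Any, Iterable, Optional, Generator, Tuple
--
-- def span(start: int, stop: Optional[int] = None,
--          step: int = 1) -> Generator[int, None, None]:
--     """
--     Generate a sequence of integers within a specific range.
--
--     :param start: The beginning of the sequence (or end if stop is None).
--     :type start: int
--     :param stop: The end of the sequence (exclusive).
--     :type stop: Optional[int]
--     :param step: The increment between each number in the sequence.
--     :type step: int
--     :return: A generator yielding numbers in the specified range.
--     :rtype: Generator[int, None, None]
--     :raises ValueError: If the step size is zero.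
--     """
--     if step == 0:
--         raise ValueError("span() step must not be zero")
--
--     if stop is None:
--         stop = start
--         start = 0
--
--     if step > 0:
--         while start < stop:
--             yield start
--             start += step
--     else:
--         while start > stop:
--             yield start
--             start += step
-- ===== SOURCE B (Python) =====
-- def span(start, stop=None, step=1):
--     if step == 0:
--         raise ValueError("span() step must not be zero")
--     if stop is None:
--         start, stop = 0, start
--     n = max(0, -(-(stop - start) // step))
--     for i in range(n):
--         yield start + i * step
-- ===== Notes on version B (the rewrite author's own statement) =====
-- stated objective: alternative
-- what changed: B computes the element count once with ceiling division and yields start + i*step from a single counted range loop, replacing A's two sign-dependent accumulating while loops.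
import Mathlib
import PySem

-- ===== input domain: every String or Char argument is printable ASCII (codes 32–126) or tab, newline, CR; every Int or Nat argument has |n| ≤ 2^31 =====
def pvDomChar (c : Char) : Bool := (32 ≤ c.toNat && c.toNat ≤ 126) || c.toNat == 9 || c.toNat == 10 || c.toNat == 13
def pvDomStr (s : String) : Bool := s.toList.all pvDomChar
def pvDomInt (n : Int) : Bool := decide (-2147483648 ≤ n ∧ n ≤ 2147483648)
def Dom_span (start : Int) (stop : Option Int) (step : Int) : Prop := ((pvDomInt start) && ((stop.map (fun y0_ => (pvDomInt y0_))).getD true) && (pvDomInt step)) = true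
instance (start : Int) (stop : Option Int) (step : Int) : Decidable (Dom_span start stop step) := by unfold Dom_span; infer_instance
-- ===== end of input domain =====

-- B replaces A's two sign-dependent while loops by one counted loop over a ceiling-division count (alternative decomposition, same cost).
-- Both Pythons are generators; equivalence is about the list of yielded values.

-- ===== PORT A =====
-- 'while start < stop: yield start; start += step' (step > 0)
def spanPosLoop (start stop step : Int) : List Int :=
  if _h : 0 < step ∧ start < stop then start :: spanPosLoop (start + step) stop step else []
termination_by (stop - start).toNat
decreasing_by omega

-- 'while start > stop: yield start; start += step' (step < 0)
def spanNegLoop (start stop step : Int) : List Int :=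
  if _h : step < 0 ∧ stop < start then start :: spanNegLoop (start + step) stop step else []
termination_by (start - stop).toNat
decreasing_by omega

def span (start : Int) (stop : Option Int) (step : Int) : List Int :=
  if step = 0 then []  -- A raises ValueError here; excluded by Pre_span
  else
    let p : Int × Int := match stop with
      | none => (0, start)
      | some t => (start, t)
    if step > 0 then spanPosLoop p.1 p.2 step else spanNegLoop p.1 p.2 step

-- ===== PORT B =====
def span_alt (start : Int) (stop : Option Int) (step : Int) : List Int :=
  if step = 0 then []  -- B raises ValueError here; excluded by Pre_span
  else
    let p : Int × Int := match stop with
      | none => (0, start)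
      | some t => (start, t)
    let n : Int := max 0 (-(PySem.Int.floordiv (-(p.2 - p.1)) step))
    (PySem.List.pyRange 0 n 1).map (fun i => p.1 + i * step)

-- ===== PRECONDITION & SPEC =====
-- A (and B) raise ValueError exactly when step = 0.
def Pre_span (start : Int) (stop : Option Int) (step : Int) : Prop := step ≠ 0
instance (start : Int) (stop : Option Int) (step : Int) : Decidable (Pre_span start stop step) := by unfold Pre_span; infer_instance
def pvWitness_span : Int × Option Int × Int := (0, some 5, 2)

def Spec_span (start : Int) (stop : Option Int) (step : Int) (out : List Int) : Prop := out = span_alt start stop step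
instance (start : Int) (stop : Option Int) (step : Int) (out : List Int) : Decidable (Spec_span start stop step out) := by unfold Spec_span; infer_instance

-- ===== CLAIM (what is proved, stated in full; the proofs are below) =====
def Claim_equal_span : Prop := ∀ (start : Int) (stop : Option Int) (step : Int), Dom_span start stop step → Pre_span start stop step → Spec_span start stop step (span start stop step)

-- ===== LEMMAS AND PROOFS =====

-- the positive-step while loop yields exactly n counted elements
lemma spanPosLoop_eq_range (step : Int) (hs : 0 < step) :
    ∀ (n : Nat) (start stop : Int),
      stop - start ≤ (n : Int) * step →
      (n = 0 ∨ ((n : Int) - 1) * step < stop - start) →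
      spanPosLoop start stop step = (List.range n).map (fun (i : Nat) => start + (i : Int) * step) := by
  intro n
  induction n with
  | zero =>
    intro start stop hub _
    rw [spanPosLoop]
    simp only [Nat.cast_zero, zero_mul] at hub
    have : ¬ (0 < step ∧ start < stop) := by omega
    simp [this]
  | succ n ih =>
    intro start stop hub hlb
    have hlb' : ((n : Int) + 1 - 1) * step < stop - start := by
      rcases hlb with h | h
      · omega
      · push_cast at h ⊢; linarith
    have hlt : start < stop := by nlinarith [Int.natCast_nonneg n]
    rw [spanPosLoop]
    simp only [hs, hlt, and_self, dif_pos]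
    rw [ih (start + step) stop (by push_cast at hub ⊢; linarith)
        (by rcases Nat.eq_zero_or_pos n with h0 | h0
            · exact Or.inl h0
            · right; push_cast at hlb' ⊢; linarith)]
    rw [List.range_succ_eq_map, List.map_cons, List.map_map]
    simp only [Nat.cast_zero, zero_mul, add_zero]
    congr 1
    apply List.map_congr_left
    intro i _
    simp only [Function.comp_apply]
    push_cast
    ring

-- the negative-step while loop yields exactly n counted elements
lemma spanNegLoop_eq_range (step : Int) (hs : step < 0) :
    ∀ (n : Nat) (start stop : Int),
      start - stop ≤ (n : Int) * (-step) →
      (n = 0 ∨ ((n : Int) - 1) * (-step) < start - stop) →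
      spanNegLoop start stop step = (List.range n).map (fun (i : Nat) => start + (i : Int) * step) := by
  intro n
  induction n with
  | zero =>
    intro start stop hub _
    rw [spanNegLoop]
    simp only [Nat.cast_zero, zero_mul] at hub
    have : ¬ (step < 0 ∧ stop < start) := by omega
    simp [this]
  | succ n ih =>
    intro start stop hub hlb
    have hlb' : ((n : Int) + 1 - 1) * (-step) < start - stop := by
      rcases hlb with h | h
      · omega
      · push_cast at h ⊢; linarith
    have hlt : stop < start := by nlinarith [Int.natCast_nonneg n]
    rw [spanNegLoop]
    simp only [hs, hlt, and_self, dif_pos]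
    rw [ih (start + step) stop (by push_cast at hub ⊢; linarith)
        (by rcases Nat.eq_zero_or_pos n with h0 | h0
            · exact Or.inl h0
            · right; push_cast at hlb' ⊢; linarith)]
    rw [List.range_succ_eq_map, List.map_cons, List.map_map]
    simp only [Nat.cast_zero, zero_mul, add_zero]
    congr 1
    apply List.map_congr_left
    intro i _
    simp only [Function.comp_apply]
    push_cast
    ring

-- the sign-split while loops equal B's single counted map, for every nonzero step
lemma span_core (s e step : Int) (hpre : step ≠ 0) :
    (if step > 0 then spanPosLoop s e step else spanNegLoop s e step)
      = (PySem.List.pyRange 0 (max 0 (-(PySem.Int.floordiv (-(e - s)) step))) 1).map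
          (fun i => s + i * step) := by
  set q : Int := -(PySem.Int.floordiv (-(e - s)) step) with hq
  rw [PySem.List.pyRange_one, List.map_map]
  have hcnt : (max 0 q - 0).toNat = q.toNat := by omega
  rw [hcnt]
  by_cases hstep : 0 < step
  · have hbr : (q - 1) * step < e - s ∧ e - s ≤ q * step :=
      (PySem.Int.neg_floordiv_neg_eq_iff_of_pos hstep).mp hq.symm
    rw [if_pos hstep,
        spanPosLoop_eq_range step hstep q.toNat s e
          (by rcases (by omega : q < 0 ∨ 0 ≤ q) with h | h
              · have h0 : q.toNat = 0 := by omega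
                rw [h0]; push_cast
                nlinarith [hbr.2]
              · rw [Int.toNat_of_nonneg h]; exact hbr.2)
          (by rcases (by omega : q ≤ 0 ∨ 0 < q) with h | h
              · left; omega
              · right; rw [Int.toNat_of_nonneg (le_of_lt h)]; exact hbr.1)]
    apply List.map_congr_left
    intro i _
    simp only [Function.comp_apply]
    ring
  · have hneg : step < 0 := by omega
    have hflip : PySem.Int.floordiv (-(e - s)) step = PySem.Int.floordiv (-(s - e)) (-step) := by
      rw [show -(e - s) = s - e by ring]
      have := PySem.Int.floordiv_neg_neg (-(s - e)) (-step)
      simpa using this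
    have hq' : q = -(PySem.Int.floordiv (-(s - e)) (-step)) := by rw [hq, hflip]
    have hbr : (q - 1) * (-step) < s - e ∧ s - e ≤ q * (-step) :=
      (PySem.Int.neg_floordiv_neg_eq_iff_of_pos (by omega : (0:Int) < -step)).mp hq'.symm
    rw [if_neg hstep,
        spanNegLoop_eq_range step hneg q.toNat s e
          (by rcases (by omega : q < 0 ∨ 0 ≤ q) with h | h
              · have h0 : q.toNat = 0 := by omega
                rw [h0]; push_cast
                nlinarith [hbr.2]
              · rw [Int.toNat_of_nonneg h]; exact hbr.2)
          (by rcases (by omega : q ≤ 0 ∨ 0 < q) with h | h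
              · left; omega
              · right; rw [Int.toNat_of_nonneg (le_of_lt h)]; exact hbr.1)]
    apply List.map_congr_left
    intro i _
    simp only [Function.comp_apply]
    ring

-- ===== VERDICT (by name: the statement is the Claim_ definition above) =====
theorem span_spec : Claim_equal_span := by
  intro start stop step _ hpre
  unfold Spec_span span span_alt
  cases stop with
  | none =>
    rw [if_neg hpre, if_neg hpre]
    simpa using span_core 0 start step hpre
  | some t =>
    rw [if_neg hpre, if_neg hpre]
    simpa using span_core start t step hpre
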